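-- pv_equiv track=rewrite | github.com/Sylphiann/AsdosBot | src/commands/aidenisfir.py | raidenify
-- ===== SOURCE A (Python) =====
-- VOCAL_GET = { "a" : "aiden", "i" : "isfir", "u" : "usfur", "e" : "eiden", "o" : "osfor",
--              "A" : "Aiden", "I" : "Isfir", "U" : "Usfur", "E" : "Eiden", "O" : "Osfor" }
--
-- def getVocal (ch: str) -> str:
--     if ch in VOCAL_GET:
--         return VOCAL_GET[ch]
--     return ch
--
-- def raidenify (text: str):
--     if len(text) == 0:
--         return ""
--
--     elif text[0] in VOCAL_GET:
--         return getVocal(text[0]) + raidenify(text[1:])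
--
--     elif text.startswith("ng") and len(text) > 2:
--         if text[2] not in VOCAL_GET:
--             return "streng" + raidenify(text[2:])
--
--     elif text[0].isalpha() and text[0] not in VOCAL_GET and len(text) > 1:
--         if text[1] not in VOCAL_GET:
--             return f"{text[0]}es" + raidenify(text[1:])
--
--     return text[0] + raidenify(text[1:])
-- ===== SOURCE B (Python) =====
-- VOCAL_GET = { "a" : "aiden", "i" : "isfir", "u" : "usfur", "e" : "eiden", "o" : "osfor",
--              "A" : "Aiden", "I" : "Isfir", "U" : "Usfur", "E" : "Eiden", "O" : "Osfor" }
--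
-- def _step(text, i):
--     # decide the output piece for position i and the next position: O(1), no slicing
--     c = text[i]
--     if c in VOCAL_GET:
--         return VOCAL_GET[c], i + 1
--     if c == 'n' and i + 2 < len(text) and text[i + 1] == 'g':
--         if text[i + 2] not in VOCAL_GET:
--             return "streng", i + 2
--         return c, i + 1
--     if c.isalpha() and i + 1 < len(text) and text[i + 1] not in VOCAL_GET:
--         return c + "es", i + 1
--     return c, i + 1
--
-- def raidenify(text):
--     parts = []
--     i = 0
--     while i < len(text):
--         piece, i = _step(text, i)
--         parts.append(piece)
--     return "".join(parts)
-- ===== Notes on version B (the rewrite author's own statement) =====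
-- stated objective: faster
-- what changed: Replaces A's recursion that rebuilds a string slice and re-concatenates at every character (quadratic) by a single left-to-right index loop: an O(1) helper decides the piece emitted at the current position and the next index, pieces are collected in a list and joined once.
import Mathlib
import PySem

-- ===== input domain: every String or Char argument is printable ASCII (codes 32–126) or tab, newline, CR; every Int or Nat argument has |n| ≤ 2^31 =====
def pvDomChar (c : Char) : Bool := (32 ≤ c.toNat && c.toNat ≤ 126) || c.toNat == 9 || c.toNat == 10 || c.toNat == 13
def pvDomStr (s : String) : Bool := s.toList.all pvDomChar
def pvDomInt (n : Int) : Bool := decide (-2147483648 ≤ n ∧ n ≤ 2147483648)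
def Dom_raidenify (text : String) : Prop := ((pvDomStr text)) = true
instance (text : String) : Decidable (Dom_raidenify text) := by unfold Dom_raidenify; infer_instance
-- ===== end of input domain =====

-- B replaces A's O(n^2) recursion on string slices by a single O(n) index loop
-- appending pieces to a list and joining once; return values are identical.

-- ===== PORT A =====
-- VOCAL_GET as a membership test + lookup (single-char keys)
def vocalGet? (c : Char) : Option (List Char) :=
  if c = 'a' then some "aiden".toList
  else if c = 'i' then some "isfir".toList
  else if c = 'u' then some "usfur".toList
  else if c = 'e' then some "eiden".toList
  else if c = 'o' then some "osfor".toList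
  else if c = 'A' then some "Aiden".toList
  else if c = 'I' then some "Isfir".toList
  else if c = 'U' then some "Usfur".toList
  else if c = 'E' then some "Eiden".toList
  else if c = 'O' then some "Osfor".toList
  else none

def isVocal (c : Char) : Bool := (vocalGet? c).isSome

-- getVocal: lookup if present, else the char itself
def getVocal (c : Char) : List Char := (vocalGet? c).getD [c]

-- A's recursion on the character list (text[1:] / text[2:] are the structural tails)
def raidenifyList : List Char → List Char
  | [] => []
  | c :: rest =>
    if isVocal c then
      getVocal c ++ raidenifyList rest
    else
      match rest with
      | g :: d :: tl =>
        if c = 'n' ∧ g = 'g' then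
          -- elif matched: inner `if`, else fall through to the final return
          if ¬ isVocal d then "streng".toList ++ raidenifyList (d :: tl)
          else c :: raidenifyList (g :: d :: tl)
        else if PySem.Chars.isalpha c ∧ ¬ isVocal g then
          c :: 'e' :: 's' :: raidenifyList (g :: d :: tl)
        else c :: raidenifyList (g :: d :: tl)
      | [g] =>
        if PySem.Chars.isalpha c ∧ ¬ isVocal g then
          c :: 'e' :: 's' :: raidenifyList [g]
        else c :: raidenifyList [g]
      | [] => c :: raidenifyList []

def raidenify (text : String) : String := String.ofList (raidenifyList text.toList)

-- ===== PORT B =====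
-- _step: the piece emitted at the current position and the remaining suffix
def altStep (c : Char) (rest : List Char) : List Char × List Char :=
  if isVocal c then (getVocal c, rest)
  else
    match rest with
    | g :: d :: tl =>
      if c = 'n' ∧ g = 'g' then
        if ¬ isVocal d then ("streng".toList, d :: tl) else ([c], rest)
      else if PySem.Chars.isalpha c ∧ ¬ isVocal g then ([c, 'e', 's'], rest)
      else ([c], rest)
    | [g] =>
      if PySem.Chars.isalpha c ∧ ¬ isVocal g then ([c, 'e', 's'], rest)
      else ([c], rest)
    | [] => ([c], rest)

theorem altStep_snd_length (c : Char) (rest : List Char) :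
    (altStep c rest).2.length ≤ rest.length := by
  cases rest with
  | nil => simp [altStep]; split_ifs <;> simp
  | cons g t =>
    cases t with
    | nil => simp [altStep]; split_ifs <;> simp
    | cons d tl => simp [altStep]; split_ifs <;> simp

-- the while loop: accumulate pieces front-to-back (parts is kept reversed)
def altLoop : List Char → List (List Char) → List (List Char)
  | [], parts => parts
  | c :: rest, parts =>
    let st := altStep c rest
    altLoop st.2 (st.1 :: parts)
termination_by l _ => l.length
decreasing_by
  simp only [List.length_cons]
  exact Nat.lt_succ_of_le (altStep_snd_length c rest)

-- "".join(parts)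
def raidenify_alt (text : String) : String :=
  String.ofList ((altLoop text.toList []).reverse.flatten)

-- ===== PRECONDITION & SPEC =====
def Spec_raidenify (text : String) (out : String) : Prop := out = raidenify_alt text
instance (text : String) (out : String) : Decidable (Spec_raidenify text out) := by unfold Spec_raidenify; infer_instance

-- ===== CLAIM (what is proved, stated in full; the proofs are below) =====
def Claim_equal_raidenify : Prop := ∀ (text : String), Dom_raidenify text → Spec_raidenify text (raidenify text)

-- ===== LEMMAS AND PROOFS =====

-- one step of A's recursion is exactly altStep
theorem raidenifyList_step (c : Char) (rest : List Char) :
    raidenifyList (c :: rest) = (altStep c rest).1 ++ raidenifyList (altStep c rest).2 := by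
  unfold altStep
  cases rest with
  | nil => simp [raidenifyList]; split_ifs <;> simp_all [getVocal, raidenifyList]
  | cons g t =>
    cases t with
    | nil => simp [raidenifyList]; split_ifs <;> simp_all [getVocal, raidenifyList]
    | cons d tl =>
      simp only [raidenifyList]
      split_ifs <;> simp_all [getVocal]

-- loop invariant: the accumulated reversed-flattened parts prefix A's result
theorem altLoop_inv (n : Nat) : ∀ (l : List Char) (parts : List (List Char)), l.length ≤ n →
    (altLoop l parts).reverse.flatten = parts.reverse.flatten ++ raidenifyList l := by
  induction n with
  | zero =>
    intro l parts h
    have : l = [] := List.eq_nil_of_length_eq_zero (Nat.le_zero.mp h)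
    subst this; simp [altLoop, raidenifyList]
  | succ n ih =>
    intro l parts h
    cases l with
    | nil => simp [altLoop, raidenifyList]
    | cons c rest =>
      rw [altLoop]
      have hlen : (altStep c rest).2.length ≤ n := by
        have := altStep_snd_length c rest
        simp at h; omega
      rw [ih _ _ hlen, raidenifyList_step]
      simp

-- ===== VERDICT (by name: the statement is the Claim_ definition above) =====
theorem raidenify_spec : Claim_equal_raidenify := by
  intro text _
  unfold Spec_raidenify raidenify raidenify_alt
  rw [altLoop_inv text.toList.length text.toList [] le_rfl]
  simp
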